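-- pv_equiv track=rewrite | github.com/pypi-data/pypi-mirror-165 | packages/threedi-raster-edits/threedi_raster_edits-0.27-py3-none-any.whl/threedi_raster_edits/gis/vector.py | lookup_unordered
-- ===== SOURCE A (Python) =====
-- import operator
--
-- def lookup_unordered(value, table, lookup_table):
--     """fastest way to lookup a value by using an index in a unordered list
--     Looping over a list only once
--     returns a list of matching values
--     """
--
--     values = []
--
--     if value not in table:
--         return values
--
--     index = 0
--
--     # last index of value in table
--     end = len(table) - operator.indexOf(reversed(table), value) - 1
--
--     # when the first value is the only one
--     if end == 0:
--         return [lookup_table[0]]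
--
--     while index <= end:
--         index = table.index(value, index)
--         values.append(lookup_table[index])
--         index += 1
--
--     return values
-- ===== SOURCE B (Python) =====
-- def lookup_unordered(value, table, lookup_table):
--     """fastest way to lookup a value by using an index in a unordered list
--     Looping over a list only once
--     returns a list of matching values
--     """
--     return [lookup_table[i] for i, v in enumerate(table) if v == value]
-- ===== Notes on version B (the rewrite author's own statement) =====
-- stated objective: simpler
-- what changed: Replaces the membership test, the reversed indexOf pass computing the last index, the end==0 special case and the while-loop of repeated table.index calls by a single enumerate pass that collects lookup_table[i] wherever table[i] == value.
import Mathlib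
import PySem

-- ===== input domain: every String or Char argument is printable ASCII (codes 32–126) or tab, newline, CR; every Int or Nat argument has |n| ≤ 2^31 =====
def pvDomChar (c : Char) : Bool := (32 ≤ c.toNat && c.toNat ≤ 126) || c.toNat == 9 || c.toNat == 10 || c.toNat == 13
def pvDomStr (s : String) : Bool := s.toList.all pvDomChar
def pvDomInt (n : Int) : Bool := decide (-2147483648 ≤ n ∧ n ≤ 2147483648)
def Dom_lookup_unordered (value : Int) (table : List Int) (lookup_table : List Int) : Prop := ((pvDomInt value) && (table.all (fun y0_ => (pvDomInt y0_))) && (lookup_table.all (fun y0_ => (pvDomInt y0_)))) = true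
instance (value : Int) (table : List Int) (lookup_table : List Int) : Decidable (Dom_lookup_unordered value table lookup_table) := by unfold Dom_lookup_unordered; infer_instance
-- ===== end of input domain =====

-- B replaces A's three passes (membership test, reversed indexOf for the last index, repeated
-- table.index while-loop) by one enumerate pass collecting lookup_table[i] at the matches (simpler).

-- ===== PORT A =====
-- table.index(value, start) with 0 ≤ start: exact as the first match in the suffix plus the offset.
def luIndexFrom (table : List Int) (value : Int) (start : Nat) : Option Nat :=
  (PySem.List.index? (table.drop start) value).map (· + start)

-- the while loop; fuel = endIdx+1 bounds the iterations (index strictly increases each pass).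
-- lookup_table[index] with 0 ≤ index is ported as pyGet?; Pre_ keeps it in range (Python raises).
def luLoop (value : Int) (table lookup_table : List Int) (endIdx : Nat) :
    Nat → Nat → List Int → List Int
  | 0, _, acc => acc
  | fuel+1, index, acc =>
    if index ≤ endIdx then
      match luIndexFrom table value index with
      | none => acc   -- unreachable: Python's table.index raises, but value ∈ table at ≥ index here
      | some i => luLoop value table lookup_table endIdx fuel (i+1)
          (acc ++ [(PySem.List.pyGet? lookup_table (i : Int)).getD 0])
    else acc

def lookup_unordered (value : Int) (table : List Int) (lookup_table : List Int) : List Int :=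
  if value ∈ table then
    -- end = len(table) - operator.indexOf(reversed(table), value) - 1 (exact: the indexOf ≤ len-1 here)
    let endIdx : Nat := table.length - ((PySem.List.index? table.reverse value).getD 0) - 1
    if endIdx = 0 then [(PySem.List.pyGet? lookup_table (0 : Int)).getD 0]
    else luLoop value table lookup_table endIdx (endIdx + 1) 0 []
  else []

-- ===== PORT B =====
-- the comprehension of Source B: one forward pass with the running index of enumerate
def altGo (value : Int) (lookup_table : List Int) : List Int → Nat → List Int
  | [], _ => []
  | v :: rest, i =>
    (if v = value then [(PySem.List.pyGet? lookup_table (i : Int)).getD 0] else [])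
      ++ altGo value lookup_table rest (i + 1)

def lookup_unordered_alt (value : Int) (table : List Int) (lookup_table : List Int) : List Int :=
  altGo value lookup_table table 0

-- ===== PRECONDITION & SPEC =====
-- Pre_ excludes exactly the inputs where Python A raises IndexError: a matching index of table
-- that is out of range for lookup_table (Source B raises the same IndexError there).
def Pre_lookup_unordered (value : Int) (table : List Int) (lookup_table : List Int) : Prop :=
  ∀ i : Nat, i < table.length → table[i]? = some value → i < lookup_table.length

instance (value : Int) (table : List Int) (lookup_table : List Int) : Decidable (Pre_lookup_unordered value table lookup_table) := by unfold Pre_lookup_unordered; infer_instance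

def pvWitness_lookup_unordered : Int × List Int × List Int := (2, [1, 2, 3, 2], [10, 20, 30, 40])

def Spec_lookup_unordered (value : Int) (table : List Int) (lookup_table : List Int) (out : List Int) : Prop := out = lookup_unordered_alt value table lookup_table
instance (value : Int) (table : List Int) (lookup_table : List Int) (out : List Int) : Decidable (Spec_lookup_unordered value table lookup_table out) := by unfold Spec_lookup_unordered; infer_instance

-- ===== CLAIM (what is proved, stated in full; the proofs are below) =====
def Claim_equal_lookup_unordered : Prop := ∀ (value : Int) (table : List Int) (lookup_table : List Int), Dom_lookup_unordered value table lookup_table → Pre_lookup_unordered value table lookup_table → Spec_lookup_unordered value table lookup_table (lookup_unordered value table lookup_table)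

-- ===== LEMMAS AND PROOFS =====

-- no match at index ≥ start ⇒ B's pass over the suffix yields []
theorem altGo_nil_of_no_match (value : Int) (lt : List Int) (l : List Int) (s : Nat)
    (h : ∀ k : Nat, l[k]? ≠ some value) : altGo value lt l s = [] := by
  induction l generalizing s with
  | nil => rfl
  | cons x xs ih =>
    have hx : x ≠ value := by
      intro he; exact h 0 (by simp [he])
    simp only [altGo, if_neg hx, List.nil_append]
    exact ih (s + 1) (fun k => by simpa using h (k + 1))

-- skipping non-matching indices: B's pass from idx equals B's pass from i
theorem altGo_skip (value : Int) (lt table : List Int) (idx i : Nat)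
    (hle : idx ≤ i) (hi : i ≤ table.length)
    (hno : ∀ j : Nat, idx ≤ j → j < i → table[j]? ≠ some value) :
    altGo value lt (table.drop idx) idx = altGo value lt (table.drop i) i := by
  induction i with
  | zero => simp_all
  | succ n ih =>
    rcases Nat.eq_or_lt_of_le hle with h | h
    · rw [h]
    · have hidx : idx ≤ n := Nat.lt_succ_iff.mp h
      have hn : n < table.length := Nat.lt_of_lt_of_le (Nat.lt_succ_self n) hi
      have hne : table[n]'hn ≠ value := by
        intro he
        exact hno n hidx (Nat.lt_succ_self n) (List.getElem?_eq_some_iff.mpr ⟨hn, he⟩)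
      rw [ih hidx (Nat.le_of_lt hn) (fun j h1 h2 => hno j h1 (Nat.lt_succ_of_lt h2))]
      rw [List.drop_eq_getElem_cons hn]
      simp only [altGo, if_neg hne, List.nil_append]

-- facts extracted from a successful luIndexFrom
theorem luIndexFrom_spec (table : List Int) (value : Int) (start i : Nat)
    (h : luIndexFrom table value start = some i) :
    start ≤ i ∧ i < table.length ∧ table[i]? = some value ∧
      ∀ j : Nat, start ≤ j → j < i → table[j]? ≠ some value := by
  unfold luIndexFrom at h
  cases hk : PySem.List.index? (table.drop start) value with
  | none => rw [hk] at h; simp at h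
  | some k =>
    rw [hk] at h
    simp only [Option.map_some, Option.some.injEq] at h
    subst h
    obtain ⟨hklt, hkv, hkmin⟩ := PySem.List.getElem_of_index?_eq_some hk
    have hlen : k + start < table.length := by
      have := hklt; rw [List.length_drop] at this; omega
    have hkv? : table[start + k]? = some value := by
      rw [← List.getElem?_drop]
      exact List.getElem?_eq_some_iff.mpr ⟨hklt, hkv⟩
    refine ⟨Nat.le_add_left _ _, hlen, by rwa [Nat.add_comm k start], ?_⟩
    intro j h1 h2 hv
    have hjlt : j - start < (table.drop start).length := by rw [List.length_drop]; omega
    have : (table.drop start)[j - start]? = some value := by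
      rw [List.getElem?_drop]
      have : start + (j - start) = j := by omega
      rw [this]; exact hv
    obtain ⟨_, hgv⟩ := List.getElem?_eq_some_iff.mp this
    exact hkmin (j - start) (by omega) hgv

-- value present somewhere ≥ start ⇒ luIndexFrom succeeds
theorem luIndexFrom_isSome (table : List Int) (value : Int) (start m : Nat)
    (hv : table[m]? = some value) (hge : start ≤ m) :
    ∃ i, luIndexFrom table value start = some i := by
  obtain ⟨hm, hveq⟩ := List.getElem?_eq_some_iff.mp hv
  have hmem : value ∈ table.drop start := by
    have hlt : m - start < (table.drop start).length := by rw [List.length_drop]; omega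
    have : (table.drop start)[m - start]? = some value := by
      rw [List.getElem?_drop]
      have : start + (m - start) = m := by omega
      rw [this]; exact hv
    obtain ⟨h1, h2⟩ := List.getElem?_eq_some_iff.mp this
    exact h2 ▸ List.getElem_mem h1
  have := (PySem.List.index?_isSome_iff (xs := table.drop start) (v := value)).mpr hmem
  rcases Option.isSome_iff_exists.mp this with ⟨k, hk⟩
  exact ⟨k + start, by unfold luIndexFrom; rw [hk]; rfl⟩

-- main loop invariant: with endIdx the last match, the while loop appends exactly B's pass from idx
theorem luLoop_eq (value : Int) (table lt : List Int) (endIdx : Nat)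
    (hv : table[endIdx]? = some value)
    (hlast : ∀ j : Nat, endIdx < j → table[j]? ≠ some value) :
    ∀ (fuel idx : Nat) (acc : List Int), endIdx + 1 ≤ fuel + idx →
      luLoop value table lt endIdx fuel idx acc = acc ++ altGo value lt (table.drop idx) idx := by
  intro fuel
  induction fuel with
  | zero =>
    intro idx acc hf
    have : altGo value lt (table.drop idx) idx = [] := by
      apply altGo_nil_of_no_match
      intro k
      rw [List.getElem?_drop]
      exact hlast (idx + k) (by omega)
    simp [luLoop, this]
  | succ n ih =>
    intro idx acc hf
    by_cases hidx : idx ≤ endIdx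
    · obtain ⟨i, hi⟩ := luIndexFrom_isSome table value idx endIdx hv hidx
      obtain ⟨hge, hilt, hiv, hmin⟩ := luIndexFrom_spec table value idx i hi
      have hiend : i ≤ endIdx := by
        by_contra hgt
        exact hmin endIdx hidx (by omega) hv
      simp only [luLoop, if_pos hidx, hi]
      rw [ih (i + 1) _ (by omega)]
      rw [altGo_skip value lt table idx i hge (Nat.le_of_lt hilt) hmin]
      obtain ⟨hilt', hivv⟩ := List.getElem?_eq_some_iff.mp hiv
      rw [List.drop_eq_getElem_cons hilt']
      simp [altGo, hivv]
    · have hend : altGo value lt (table.drop idx) idx = [] := by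
        apply altGo_nil_of_no_match
        intro k
        rw [List.getElem?_drop]
        exact hlast (idx + k) (by omega)
      simp [luLoop, if_neg hidx, hend]

-- the last index of value via reversed indexOf really is the last match
theorem last_index_spec (table : List Int) (value : Int) (hmem : value ∈ table) :
    ∃ k, PySem.List.index? table.reverse value = some k ∧ k < table.length ∧
      table[table.length - k - 1]? = some value ∧
      ∀ j : Nat, table.length - k - 1 < j → table[j]? ≠ some value := by
  have hmemr : value ∈ table.reverse := List.mem_reverse.mpr hmem
  rcases Option.isSome_iff_exists.mp
      ((PySem.List.index?_isSome_iff (xs := table.reverse) (v := value)).mpr hmemr) with ⟨k, hk⟩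
  obtain ⟨hklt, hkv, hkmin⟩ := PySem.List.getElem_of_index?_eq_some hk
  have hklen : k < table.length := by rw [List.length_reverse] at hklt; exact hklt
  refine ⟨k, hk, hklen, ?_, ?_⟩
  · have h1 : table.reverse[k]? = table[table.length - 1 - k]? :=
      List.getElem?_reverse (by omega)
    have h2 : table.length - 1 - k = table.length - k - 1 := by omega
    rw [h2] at h1
    rw [← h1]
    exact List.getElem?_eq_some_iff.mpr ⟨hklt, hkv⟩
  · intro j hj1 hj
    by_cases hj2 : j < table.length
    · have hj' : table.length - 1 - j < k := by omega
      have hlt' : table.length - 1 - j < table.reverse.length := by rw [List.length_reverse]; omega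
      have hrev : table.reverse[table.length - 1 - j]? = table[j]? := by
        rw [List.getElem?_reverse (by omega)]
        have : table.length - 1 - (table.length - 1 - j) = j := by omega
        rw [this]
      rw [← hrev] at hj
      obtain ⟨_, hg⟩ := List.getElem?_eq_some_iff.mp hj
      exact hkmin _ hj' hg
    · rw [List.getElem?_eq_none (by omega)] at hj
      simp at hj

-- ===== VERDICT (by name: the statement is the Claim_ definition above) =====
theorem lookup_unordered_spec : Claim_equal_lookup_unordered := by
  intro value table lt _ _
  unfold Spec_lookup_unordered lookup_unordered lookup_unordered_alt
  by_cases hmem : value ∈ table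
  · rw [if_pos hmem]
    obtain ⟨k, hk, hklt, hkv, hklast⟩ := last_index_spec table value hmem
    rw [hk]
    simp only [Option.getD_some]
    by_cases h0 : table.length - k - 1 = 0
    · rw [if_pos h0]
      rw [h0] at hkv hklast
      obtain ⟨hlen0, hv0⟩ := List.getElem?_eq_some_iff.mp hkv
      have htl : table = table[0]'hlen0 :: table.drop 1 := by
        rw [← List.drop_eq_getElem_cons]; simp
      conv_rhs => rw [htl]
      simp only [altGo, if_pos hv0]
      have : altGo value lt (table.drop 1) 1 = [] := by
        apply altGo_nil_of_no_match
        intro j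
        rw [List.getElem?_drop]
        exact hklast (1 + j) (by omega)
      rw [this]; rfl
    · rw [if_neg h0]
      have := luLoop_eq value table lt (table.length - k - 1) hkv hklast
        (table.length - k - 1 + 1) 0 [] (by omega)
      rw [this]; simp
  · rw [if_neg hmem]
    symm
    apply altGo_nil_of_no_match
    intro j hv
    obtain ⟨hj, hg⟩ := List.getElem?_eq_some_iff.mp hv
    exact hmem (hg ▸ List.getElem_mem hj)
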